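-- pv_equiv track=rewrite | github.com/heitorchang/learn-code | codefights/tourneys/monthly_june_2017.py | matchChars
-- ===== SOURCE A (Python) =====
-- def matchChars(base, s):
--     baseCursor = 0
--     out = []
--     lenBase = len(base)
--     increased = False
--     # out = 0
--     for sCursor in range(len(s)):
--         if s[sCursor] == base[baseCursor]:
--             if s[sCursor] == 1:
--                 if not increased:
--                     increased = True
--                 out.append(s[sCursor])
--             else:
--                 if not increased:
--                     out.append(s[sCursor])
--             # out += 1
--             baseCursor += 1
--             if baseCursor == lenBase:
--                 break
--     return out
-- ===== SOURCE B (Python) =====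
-- def matchChars(base, s):
--     # Pass 1: greedy two-pointer subsequence match, collect every matched element.
--     matched = []
--     bc = 0
--     for x in s:
--         if x == base[bc]:
--             matched.append(x)
--             bc += 1
--             if bc == len(base):
--                 break
--     # Pass 2: keep everything before the first matched 1, then only the 1s after it.
--     k = next((i for i, v in enumerate(matched) if v == 1), len(matched))
--     return matched[:k] + [v for v in matched[k:] if v == 1]
-- ===== Notes on version B (the rewrite author's own statement) =====
-- stated objective: alternative
-- what changed: Replaces A's single loop with interleaved match/filter state (the 'increased' flag) by two independent passes: a plain greedy subsequence match collecting all matched elements, then a slice at the first matched 1 plus a filter keeping only 1s after it.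
import Mathlib
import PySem

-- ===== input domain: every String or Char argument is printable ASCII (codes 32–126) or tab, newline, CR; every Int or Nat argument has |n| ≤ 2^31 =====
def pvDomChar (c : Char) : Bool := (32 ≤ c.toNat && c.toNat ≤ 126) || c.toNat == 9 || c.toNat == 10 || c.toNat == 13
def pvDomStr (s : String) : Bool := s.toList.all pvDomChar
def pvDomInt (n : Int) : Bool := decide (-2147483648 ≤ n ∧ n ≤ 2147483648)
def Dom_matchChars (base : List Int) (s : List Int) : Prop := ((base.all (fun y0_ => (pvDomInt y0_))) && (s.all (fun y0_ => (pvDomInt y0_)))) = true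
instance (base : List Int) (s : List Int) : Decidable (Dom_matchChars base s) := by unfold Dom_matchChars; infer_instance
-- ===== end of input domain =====

-- B replaces A's one loop with interleaved filter state by two passes: greedy match, then slice+filter at the first matched 1 (alternative decomposition, same cost).


-- ===== PORT A =====
-- A's loop over s with state (baseCursor, increased, out); the `none` branch is
-- where Python raises IndexError (base exhausted-empty), which Pre_ excludes.
def matchCharsLoop (base : List Int) (s : List Int) (bc : Nat) (increased : Bool) (out : List Int) : List Int :=
  match s with
  | [] => out
  | x :: rest =>
    match base[bc]? with
    | none => out   -- Python: IndexError (only reachable outside Pre_)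
    | some b =>
      if x = b then
        let out' := if x = 1 then out ++ [x] else (if increased then out else out ++ [x])
        let inc' := if x = 1 then true else increased
        if bc + 1 = base.length then out'
        else matchCharsLoop base rest (bc + 1) inc' out'
      else matchCharsLoop base rest bc increased out

def matchChars (base : List Int) (s : List Int) : List Int :=
  matchCharsLoop base s 0 false []

-- ===== PORT B =====
-- Pass 1: greedy subsequence match collecting all matched elements.
def matchedLoop (base : List Int) (s : List Int) (bc : Nat) : List Int :=
  match s with
  | [] => []
  | x :: rest =>
    match base[bc]? with
    | none => []   -- Python: IndexError (only reachable outside Pre_)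
    | some b =>
      if x = b then
        if bc + 1 = base.length then [x]
        else x :: matchedLoop base rest (bc + 1)
      else matchedLoop base rest bc

def matchChars_alt (base : List Int) (s : List Int) : List Int :=
  let matched := matchedLoop base s 0
  let k := (PySem.List.index? matched 1).getD matched.length
  matched.take k ++ (matched.drop k).filter (fun v => v = 1)

-- ===== PRECONDITION & SPEC =====
-- Pre_ excludes exactly the inputs where Python A raises IndexError: empty base with non-empty s.
def Pre_matchChars (base : List Int) (s : List Int) : Prop := s = [] ∨ base ≠ []
instance (base : List Int) (s : List Int) : Decidable (Pre_matchChars base s) := by unfold Pre_matchChars; infer_instance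
def pvWitness_matchChars : List Int × List Int := ([1, 2], [2, 1, 2, 3])
def Spec_matchChars (base : List Int) (s : List Int) (out : List Int) : Prop := out = matchChars_alt base s
instance (base : List Int) (s : List Int) (out : List Int) : Decidable (Spec_matchChars base s out) := by unfold Spec_matchChars; infer_instance

-- ===== CLAIM (what is proved, stated in full; the proofs are below) =====
def Claim_equal_matchChars : Prop := ∀ (base : List Int) (s : List Int), Dom_matchChars base s → Pre_matchChars base s → Spec_matchChars base s (matchChars base s)

-- ===== LEMMAS AND PROOFS =====

-- The per-matched-element filter A applies, factored out of its loop.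
def postFilter (m : List Int) (inc : Bool) : List Int :=
  match m with
  | [] => []
  | x :: r => if x = 1 then x :: postFilter r true
              else if inc then postFilter r inc else x :: postFilter r inc

lemma matchCharsLoop_eq_post (base : List Int) (s : List Int) :
    ∀ (bc : Nat) (inc : Bool) (out : List Int),
      matchCharsLoop base s bc inc out = out ++ postFilter (matchedLoop base s bc) inc := by
  induction s with
  | nil => intro bc inc out; simp [matchCharsLoop, matchedLoop, postFilter]
  | cons x rest ih =>
    intro bc inc out
    simp only [matchCharsLoop, matchedLoop]
    cases hb : base[bc]? with
    | none => simp [postFilter]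
    | some b =>
      by_cases hxb : x = b
      · simp only [hxb]
        by_cases hend : bc + 1 = base.length
        · simp only [if_pos hend]
          by_cases h1 : b = 1 <;> cases inc <;> simp [h1, postFilter]
        · simp only [if_neg hend, ih]
          by_cases h1 : b = 1 <;> cases inc <;> simp [h1, postFilter]
      · simp [hxb, ih]

lemma postFilter_true (m : List Int) : postFilter m true = m.filter (fun v => v = 1) := by
  induction m with
  | nil => simp [postFilter]
  | cons x r ih =>
    by_cases h1 : x = 1 <;> simp [postFilter, h1, ih, List.filter]

lemma postFilter_false (m : List Int) :
    postFilter m false =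
      m.take ((PySem.List.index? m 1).getD m.length) ++
        (m.drop ((PySem.List.index? m 1).getD m.length)).filter (fun v => v = 1) := by
  induction m with
  | nil => simp [postFilter]
  | cons x r ih =>
    by_cases h1 : x = 1
    · subst h1
      rw [PySem.List.index?_cons_self]
      simp [postFilter, postFilter_true]
    · rw [PySem.List.index?_cons_of_ne r h1]
      simp only [postFilter, if_neg h1, ih]
      cases hidx : PySem.List.index? r 1 with
      | none => simp
      | some i => simp

-- ===== VERDICT (by name: the statement is the Claim_ definition above) =====
theorem matchChars_spec : Claim_equal_matchChars := by
  intro base s _ _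
  unfold Spec_matchChars matchChars matchChars_alt
  rw [matchCharsLoop_eq_post, postFilter_false]
  simp
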